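-- pv_equiv track=rewrite | github.com/epiphany40223/epiphany | pds-queries/2021-stewardship/nightly-reports.py | reorder_rows_by_date
-- ===== SOURCE A (Python) =====
-- def reorder_rows_by_date(jotform_data):
--     data = dict()
--     for row in jotform_data:
--         data[row['SubmitDate']] = row
--
--     out = list()
--     for row in sorted(data):
--         out.append(data[row])
--
--     return out
-- ===== SOURCE B (Python) =====
-- def reorder_rows_by_date(jotform_data):
--     rows = sorted(jotform_data, key=lambda r: r['SubmitDate'])
--     out = []
--     for i, row in enumerate(rows):
--         if i == len(rows) - 1 or rows[i + 1]['SubmitDate'] != row['SubmitDate']: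
--             out.append(row)
--     return out
-- ===== Notes on version B (the rewrite author's own statement) =====
-- stated objective: alternative
-- what changed: Replaces A's dict-based last-write-wins dedup followed by sorting the keys with a single stable sort of the rows by SubmitDate plus one adjacency pass that keeps the last row of each equal-date run.
import Mathlib
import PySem

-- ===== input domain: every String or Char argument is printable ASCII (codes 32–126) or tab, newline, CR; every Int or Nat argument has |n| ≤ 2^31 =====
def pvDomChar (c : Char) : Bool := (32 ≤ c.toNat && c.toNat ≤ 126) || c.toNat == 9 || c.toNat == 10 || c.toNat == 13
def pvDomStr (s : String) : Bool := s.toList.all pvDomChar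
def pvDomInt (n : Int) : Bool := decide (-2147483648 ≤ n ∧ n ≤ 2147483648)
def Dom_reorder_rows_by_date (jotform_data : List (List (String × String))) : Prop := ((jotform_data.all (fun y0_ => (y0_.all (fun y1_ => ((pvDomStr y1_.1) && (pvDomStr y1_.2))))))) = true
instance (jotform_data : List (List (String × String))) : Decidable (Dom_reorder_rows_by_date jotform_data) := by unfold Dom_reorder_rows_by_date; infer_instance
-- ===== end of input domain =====

-- B replaces A's dict-based last-write-wins dedup with a stable sort by SubmitDate followed by
-- one adjacency pass keeping the last row of each equal-date run (objective: alternative).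

-- row['SubmitDate']: first-match association-list lookup (Python dict); '' never occurs under Pre_
def pvKey (row : List (String × String)) : String := (row.lookup "SubmitDate").getD ""

-- ===== PORT A =====
def reorder_rows_by_date (jotform_data : List (List (String × String))) : List (List (String × String)) :=
  let data := jotform_data.foldl (fun d row => d.insert (pvKey row) row)
    (PySem.Dict.empty : PySem.Dict String (List (String × String)))
  (PySem.List.sorted data.keys (fun k => k)).foldl (fun out k => out ++ [data.getD k []]) []

-- ===== PORT B =====
-- the adjacency pass of Source B: keep row i iff it is last or the next row has a different date
def pvKeepLast : List (List (String × String)) → List (List (String × String))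
  | [] => []
  | [r] => [r]
  | r :: s :: t => if pvKey s ≠ pvKey r then r :: pvKeepLast (s :: t) else pvKeepLast (s :: t)

def reorder_rows_by_date_alt (jotform_data : List (List (String × String))) : List (List (String × String)) :=
  pvKeepLast (PySem.List.sorted jotform_data pvKey)

-- ===== PRECONDITION & SPEC =====
-- Pre_ excludes exactly the inputs where Python A raises KeyError: a row without a 'SubmitDate' key.
def Pre_reorder_rows_by_date (jotform_data : List (List (String × String))) : Prop :=
  ∀ row ∈ jotform_data, (row.lookup "SubmitDate").isSome
instance (jotform_data : List (List (String × String))) : Decidable (Pre_reorder_rows_by_date jotform_data) := by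
  unfold Pre_reorder_rows_by_date; infer_instance

def pvWitness_reorder_rows_by_date : (List (List (String × String))) :=
  [[("SubmitDate", "2021-02-01"), ("Name", "b")], [("SubmitDate", "2021-01-01"), ("Name", "a")],
   [("SubmitDate", "2021-01-01"), ("Name", "c")]]

def Spec_reorder_rows_by_date (jotform_data : List (List (String × String))) (out : List (List (String × String))) : Prop := out = reorder_rows_by_date_alt jotform_data
instance (jotform_data : List (List (String × String))) (out : List (List (String × String))) : Decidable (Spec_reorder_rows_by_date jotform_data out) := by unfold Spec_reorder_rows_by_date; infer_instance

-- ===== CLAIM (what is proved, stated in full; the proofs are below) =====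
def Claim_equal_reorder_rows_by_date : Prop := ∀ (jotform_data : List (List (String × String))), Dom_reorder_rows_by_date jotform_data → Pre_reorder_rows_by_date jotform_data → Spec_reorder_rows_by_date jotform_data (reorder_rows_by_date jotform_data)

-- ===== LEMMAS AND PROOFS =====

-- last row of l whose SubmitDate is k ([] if none)
def pvLastD (l : List (List (String × String))) (k : String) : List (String × String) :=
  ((l.filter (fun r => decide (pvKey r = k))).getLast?).getD []

-- A's output loop is a map
theorem pv_foldl_append_map {α β : Type} (f : α → β) (l : List α) (acc : List β) :
    l.foldl (fun out k => out ++ [f k]) acc = acc ++ l.map f := by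
  induction l generalizing acc with
  | nil => simp
  | cons x xs ih => simp [List.foldl_cons, ih]

-- A's dict holds, at each key, the last row of the input with that date
theorem pv_getD_foldl (jd : List (List (String × String))) (k : String) :
    ((jd.foldl (fun d row => d.insert (pvKey row) row)
      (PySem.Dict.empty : PySem.Dict String (List (String × String)))).getD k []) = pvLastD jd k := by
  induction jd using List.reverseRecOn with
  | nil => simp [pvLastD, PySem.Dict.getD_empty]
  | append_singleton l r ih =>
    unfold pvLastD at ih ⊢
    rw [List.foldl_append, List.foldl_cons, List.foldl_nil, PySem.Dict.getD_insert,
      List.filter_append]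
    by_cases h : k = pvKey r
    · rw [if_pos h]
      have hf : List.filter (fun r => decide (pvKey r = k)) [r] = [r] := by simp [h]
      rw [hf, List.getLast?_concat]; rfl
    · rw [if_neg h]
      have hf : List.filter (fun r => decide (pvKey r = k)) [r] = [] := by simp [Ne.symm h]
      rw [hf, List.append_nil]; exact ih


-- A's dict keys are the distinct dates in first-occurrence order
theorem pv_keys_foldl (jd : List (List (String × String))) :
    ((jd.foldl (fun d row => d.insert (pvKey row) row)
      (PySem.Dict.empty : PySem.Dict String (List (String × String)))).keys)
      = PySem.Set.ofList (jd.map pvKey) := by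
  rw [PySem.Dict.keys_foldl_insert_key]
  simp [PySem.Dict.keys_empty, PySem.Set.update_nil_left]


-- stability core: inserting into a key-sorted list keeps each date's rows in order, new row last
theorem pv_filter_insertBy (x : List (String × String)) (k : String)
    (ys : List (List (String × String))) (hys : ys.Pairwise (fun a b => pvKey a ≤ pvKey b)) :
    (PySem.List.insertBy (fun a b => decide (pvKey a < pvKey b)) x ys).filter (fun r => decide (pvKey r = k))
      = if pvKey x = k then ys.filter (fun r => decide (pvKey r = k)) ++ [x]
        else ys.filter (fun r => decide (pvKey r = k)) := by
  induction ys with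
  | nil =>
    by_cases h : pvKey x = k <;> simp [PySem.List.insertBy, h]
  | cons y ys ih =>
    rw [List.pairwise_cons] at hys
    obtain ⟨hy, hys⟩ := hys
    by_cases hlt : pvKey x < pvKey y
    · rw [show PySem.List.insertBy (fun a b => decide (pvKey a < pvKey b)) x (y :: ys)
          = x :: y :: ys by simp [PySem.List.insertBy, hlt]]
      have hemp : (y :: ys).filter (fun r => decide (pvKey r = k)) = []
          ∨ ¬ pvKey x = k := by
        by_cases hxk : pvKey x = k
        · left
          rw [List.filter_eq_nil_iff]
          intro z hz
          have : pvKey y ≤ pvKey z := by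
            rcases hz with _ | hz
            · exact le_refl _
            · exact hy _ (by assumption)
          simp only [decide_eq_true_eq]
          intro hzk
          exact absurd (hxk ▸ hzk ▸ this) (not_le.mpr hlt)
        · right; exact hxk
      by_cases hxk : pvKey x = k
      · rcases hemp with hemp | hemp
        · rw [if_pos hxk, List.filter_cons, hemp]
          simp [hxk]
        · exact absurd hxk hemp
      · rw [if_neg hxk, List.filter_cons, List.filter_cons]
        simp [hxk]
    · rw [show PySem.List.insertBy (fun a b => decide (pvKey a < pvKey b)) x (y :: ys)
          = y :: PySem.List.insertBy (fun a b => decide (pvKey a < pvKey b)) x ys by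
            simp [PySem.List.insertBy, hlt]]
      rw [List.filter_cons, List.filter_cons, ih hys]
      by_cases hxk : pvKey x = k <;> by_cases hyk : pvKey y = k <;> simp [hxk, hyk]


-- stability: sorting does not change the subsequence of rows with a given date
theorem pv_filter_sorted (jd : List (List (String × String))) (k : String) :
    (PySem.List.sorted jd pvKey).filter (fun r => decide (pvKey r = k))
      = jd.filter (fun r => decide (pvKey r = k)) := by
  induction jd using List.reverseRecOn with
  | nil => simp [PySem.List.sorted_eq_foldl_insertBy]
  | append_singleton l r ih =>
    have hstep : PySem.List.sorted (l ++ [r]) pvKey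
        = PySem.List.insertBy (fun a b => decide (pvKey a < pvKey b)) r (PySem.List.sorted l pvKey) := by
      rw [PySem.List.sorted_eq_foldl_insertBy, PySem.List.sorted_eq_foldl_insertBy,
        List.foldl_append, List.foldl_cons, List.foldl_nil]
    rw [hstep, pv_filter_insertBy r k _ (PySem.List.sorted_pairwise l pvKey), List.filter_append, ih]
    by_cases h : pvKey r = k <;> simp [h]


-- distinct elements of a ≤-sorted list are <-sorted
theorem pv_ofList_pairwise_lt (l : List String) (h : l.Pairwise (· ≤ ·)) :
    (PySem.Set.ofList l).Pairwise (· < ·) := by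
  induction l with
  | nil => simp [PySem.Set.ofList_nil]
  | cons x xs ih =>
    rw [List.pairwise_cons] at h
    obtain ⟨hx, hxs⟩ := h
    rw [PySem.Set.ofList_cons]
    refine List.Pairwise.cons ?_ ?_
    · intro y hy
      unfold PySem.Set.discard at hy
      have hmem := List.of_mem_filter hy
      have hyx : y ≠ x := by simpa using hmem
      have : y ∈ PySem.Set.ofList xs := List.mem_of_mem_filter hy
      have : y ∈ xs := (PySem.Set.mem_ofList _ _).mp this
      exact lt_of_le_of_ne (hx y this) (Ne.symm hyx)
    · unfold PySem.Set.discard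
      exact List.Pairwise.filter _ (ih hxs)


theorem pv_lastD_cons_of_mem (r : List (String × String)) (rest : List (List (String × String)))
    (k : String) (hk : k ∈ rest.map pvKey) : pvLastD (r :: rest) k = pvLastD rest k := by
  obtain ⟨z, hz, hzk⟩ := List.mem_map.mp hk
  have hF : rest.filter (fun r => decide (pvKey r = k)) ≠ [] := by
    intro hnil
    have hmemf : z ∈ rest.filter (fun r => decide (pvKey r = k)) :=
      List.mem_filter.mpr ⟨hz, decide_eq_true hzk⟩
    rw [hnil] at hmemf; exact absurd hmemf (List.not_mem_nil)
  obtain ⟨f, F', hF'⟩ := List.exists_cons_of_ne_nil hF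
  unfold pvLastD
  rw [List.filter_cons]
  by_cases h : pvKey r = k
  · simp only [h, decide_true, if_pos]
    rw [hF', List.getLast?_cons_cons]
  · simp [h]

-- the adjacency pass over a key-sorted list returns, for each distinct date, its last row
theorem pv_keepLast_eq (s : List (List (String × String)))
    (hs : s.Pairwise (fun a b => pvKey a ≤ pvKey b)) :
    pvKeepLast s = (PySem.Set.ofList (s.map pvKey)).map (fun k => pvLastD s k) := by
  induction s with
  | nil => simp [pvKeepLast, PySem.Set.ofList_nil]
  | cons r rest ih =>
    rw [List.pairwise_cons] at hs
    obtain ⟨hr, htail⟩ := hs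
    match rest, ih, hr, htail with
    | [], _, _, _ =>
      simp [pvKeepLast, PySem.Set.ofList_cons, PySem.Set.ofList_nil, PySem.Set.discard, pvLastD]
    | s' :: t, ih, hr, htail =>
      by_cases hne : pvKey s' ≠ pvKey r
      · -- strictly smaller head: it is kept
        have hlt : ∀ z ∈ s' :: t, pvKey r < pvKey z := by
          intro z hz
          rcases List.mem_cons.mp hz with hz | hz
          · exact hz ▸ lt_of_le_of_ne (hr s' List.mem_cons_self) (Ne.symm hne)
          · calc pvKey r < pvKey s' := lt_of_le_of_ne (hr s' List.mem_cons_self) (Ne.symm hne)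
              _ ≤ pvKey z := (List.pairwise_cons.mp htail).1 z hz
        have hnotmem : pvKey r ∉ (s' :: t).map pvKey := by
          intro hmem
          obtain ⟨z, hz, hzk⟩ := List.mem_map.mp hmem
          exact absurd hzk (ne_of_gt (hlt z hz))
        have hofl : PySem.Set.ofList ((r :: s' :: t).map pvKey)
            = pvKey r :: PySem.Set.ofList ((s' :: t).map pvKey) := by
          rw [List.map_cons, PySem.Set.ofList_cons]
          unfold PySem.Set.discard
          rw [List.filter_eq_self.mpr]
          intro a ha
          have : a ∈ (s' :: t).map pvKey := (PySem.Set.mem_ofList _ _).mp ha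
          have hane : a ≠ pvKey r := fun h => hnotmem (h ▸ this)
          simp [hane]
        have hlast_r : pvLastD (r :: s' :: t) (pvKey r) = r := by
          unfold pvLastD
          rw [List.filter_cons]
          have hFnil : (s' :: t).filter (fun z => decide (pvKey z = pvKey r)) = [] := by
            rw [List.filter_eq_nil_iff]
            intro z hz
            simp only [decide_eq_true_eq]
            exact ne_of_gt (hlt z hz)
          simp [hFnil]
        have hcong : ∀ k ∈ PySem.Set.ofList ((s' :: t).map pvKey),
            pvLastD (r :: s' :: t) k = pvLastD (s' :: t) k := by
          intro k hk
          exact pv_lastD_cons_of_mem r (s' :: t) k ((PySem.Set.mem_ofList _ _).mp hk)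
        rw [show pvKeepLast (r :: s' :: t) = r :: pvKeepLast (s' :: t) by
              simp [pvKeepLast, hne],
            hofl, List.map_cons, hlast_r, List.map_congr_left hcong, ih htail]
      · -- equal head dates: head row is superseded
        rw [not_ne_iff] at hne
        have hofl : PySem.Set.ofList ((r :: s' :: t).map pvKey)
            = PySem.Set.ofList ((s' :: t).map pvKey) := by
          rw [List.map_cons, List.map_cons, PySem.Set.ofList_cons, PySem.Set.ofList_cons]
          unfold PySem.Set.discard
          rw [hne, List.filter_cons]
          simp [List.filter_filter]
        have hcong : ∀ k ∈ PySem.Set.ofList ((s' :: t).map pvKey),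
            pvLastD (r :: s' :: t) k = pvLastD (s' :: t) k := by
          intro k hk
          exact pv_lastD_cons_of_mem r (s' :: t) k ((PySem.Set.mem_ofList _ _).mp hk)
        rw [show pvKeepLast (r :: s' :: t) = pvKeepLast (s' :: t) by
              simp [pvKeepLast, hne],
            hofl, List.map_congr_left hcong, ih htail]


-- ===== VERDICT (by name: the statement is the Claim_ definition above) =====
theorem pv_lastD_sorted (jd : List (List (String × String))) (k : String) :
    pvLastD (PySem.List.sorted jd pvKey) k = pvLastD jd k := by
  unfold pvLastD; rw [pv_filter_sorted]

theorem reorder_rows_by_date_spec : Claim_equal_reorder_rows_by_date := by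
  intro jd _ _
  show reorder_rows_by_date jd = reorder_rows_by_date_alt jd
  have hperm : ((PySem.List.sorted jd pvKey).map pvKey).Perm (jd.map pvKey) :=
    (PySem.List.sorted_perm jd pvKey false).map pvKey
  have hkeys : PySem.List.sorted (PySem.Set.ofList (jd.map pvKey)) (fun k => k)
      = PySem.Set.ofList ((PySem.List.sorted jd pvKey).map pvKey) := by
    apply PySem.List.sorted_eq_of_perm_of_pairwise_lt
    · exact (List.perm_ext_iff_of_nodup (PySem.Set.nodup_ofList _) (PySem.Set.nodup_ofList _)).mpr
        (fun a => by
          rw [PySem.Set.mem_ofList, PySem.Set.mem_ofList]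
          exact hperm.mem_iff)
    · exact pv_ofList_pairwise_lt _
        (List.pairwise_map.mpr (PySem.List.sorted_pairwise jd pvKey))
  rw [reorder_rows_by_date, reorder_rows_by_date_alt,
    pv_foldl_append_map, List.nil_append, pv_keys_foldl,
    pv_keepLast_eq _ (PySem.List.sorted_pairwise jd pvKey), hkeys]
  apply List.map_congr_left
  intro k _
  rw [pv_getD_foldl, pv_lastD_sorted]
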